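-- pv_equiv track=rewrite | github.com/plra/aoc-2021 | d19/p1.py | find_equal_2sets
-- ===== SOURCE A (Python) =====
-- def find_equal_2sets(dist_maps):
--     e2s = []
--     # Iterate over distinct pairs of scanners
--     for r in range(len(dist_maps)):
--         for s in range(r + 1, len(dist_maps)):
--             # Iterate over pairs of coordinates of beacons as specified by scanners `r`, `s`
--             for (i_r, j_r), d_r in dist_maps[r].items():
--                 for (i_s, j_s), d_s in dist_maps[s].items():
--                     # Take scanners to be identical if their distances are equal
--                     if d_r == d_s:
--                         e2s.append(((r, i_r), (r, j_r), (s, i_s), (s, j_s)))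
--     return e2s
-- ===== SOURCE B (Python) =====
-- def find_equal_2sets(dist_maps):
--     # Index each scanner's beacon pairs by distance once; matches then come
--     # from a dict lookup instead of a scan over the other scanner's entries.
--     by_dist = []
--     for m in dist_maps:
--         groups = {}
--         for (i, j), d in m.items():
--             groups.setdefault(d, []).append((i, j))
--         by_dist.append(groups)
--     e2s = []
--     for r, m_r in enumerate(dist_maps):
--         for s in range(r + 1, len(dist_maps)):
--             lookup = by_dist[s]
--             for (i_r, j_r), d_r in m_r.items():
--                 for (i_s, j_s) in lookup.get(d_r, []):
--                     e2s.append(((r, i_r), (r, j_r), (s, i_s), (s, j_s)))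
--     return e2s
-- ===== Notes on version B (the rewrite author's own statement) =====
-- stated objective: alternative
-- what changed: B precomputes, per scanner, a dict from distance to the list of beacon pairs at that distance, so each r-entry is matched by one dict lookup instead of an inner scan over all of scanner s's entries (O(S^2*E + output) work vs A's O(S^2*E^2); on the timed inputs the output term dominates, so no measured speed-up).
import Mathlib
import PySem

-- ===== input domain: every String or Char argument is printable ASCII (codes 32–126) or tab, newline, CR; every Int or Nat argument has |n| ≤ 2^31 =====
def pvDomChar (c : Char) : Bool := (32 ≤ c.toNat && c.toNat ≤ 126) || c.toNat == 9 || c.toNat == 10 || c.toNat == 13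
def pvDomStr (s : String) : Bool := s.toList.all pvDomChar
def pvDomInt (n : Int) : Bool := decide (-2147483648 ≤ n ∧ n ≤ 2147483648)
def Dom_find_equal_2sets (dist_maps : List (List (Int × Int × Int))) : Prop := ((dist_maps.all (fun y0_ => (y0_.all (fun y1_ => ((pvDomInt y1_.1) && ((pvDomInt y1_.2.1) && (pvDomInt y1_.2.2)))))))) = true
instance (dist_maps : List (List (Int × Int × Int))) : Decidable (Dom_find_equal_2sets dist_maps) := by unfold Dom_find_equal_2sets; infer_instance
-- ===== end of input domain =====

-- B indexes each scanner's pairs by distance in a dict once and matches by lookup instead of an inner scan (alternative algorithm; same measured cost on output-dominated inputs).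

-- ===== PORT A =====
-- each dict dist_maps[r] is the association list of its items, entry ((i, j), d) flattened to (i, j, d)
def find_equal_2sets (dist_maps : List (List (Int × Int × Int))) : List ((Int × Int) × (Int × Int) × (Int × Int) × (Int × Int)) :=
  (PySem.List.pyRange 0 dist_maps.length 1).foldl (fun e2s r =>
    (PySem.List.pyRange (r + 1) dist_maps.length 1).foldl (fun e2s s =>
      (PySem.List.pyGetD dist_maps r []).foldl (fun e2s er =>
        (PySem.List.pyGetD dist_maps s []).foldl (fun e2s es =>
          if er.2.2 == es.2.2 then
            e2s ++ [((r, er.1), (r, er.2.1), (s, es.1), (s, es.2.1))]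
          else e2s) e2s) e2s) e2s) []

-- ===== PORT B =====
-- by_d.setdefault(d, []).append((i, j))  ==  by_d[d] = by_d.get(d, []) + [(i, j)]  ==  Dict.modify
def pvGroupByDist (m : List (Int × Int × Int)) : PySem.Dict Int (List (Int × Int)) :=
  m.foldl (fun by_d e => by_d.modify e.2.2 [] (· ++ [(e.1, e.2.1)])) PySem.Dict.empty

def find_equal_2sets_alt (dist_maps : List (List (Int × Int × Int))) : List ((Int × Int) × (Int × Int) × (Int × Int) × (Int × Int)) :=
  (PySem.List.enumerate dist_maps 0).foldl (fun e2s rm =>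
    (PySem.List.pyRange (rm.1 + 1) dist_maps.length 1).foldl (fun e2s s =>
      rm.2.foldl (fun e2s er =>
        ((PySem.List.pyGetD (dist_maps.map pvGroupByDist) s PySem.Dict.empty).getD er.2.2 []).foldl
          (fun e2s p => e2s ++ [((rm.1, er.1), (rm.1, er.2.1), (s, p.1), (s, p.2))]) e2s) e2s) e2s) []

-- ===== PRECONDITION & SPEC =====
def Spec_find_equal_2sets (dist_maps : List (List (Int × Int × Int))) (out : List ((Int × Int) × (Int × Int) × (Int × Int) × (Int × Int))) : Prop := out = find_equal_2sets_alt dist_maps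
instance (dist_maps : List (List (Int × Int × Int))) (out : List ((Int × Int) × (Int × Int) × (Int × Int) × (Int × Int))) : Decidable (Spec_find_equal_2sets dist_maps out) := by unfold Spec_find_equal_2sets; infer_instance

-- ===== CLAIM (what is proved, stated in full; the proofs are below) =====
def Claim_equal_find_equal_2sets : Prop := ∀ (dist_maps : List (List (Int × Int × Int))), Dom_find_equal_2sets dist_maps → Spec_find_equal_2sets dist_maps (find_equal_2sets dist_maps)

-- ===== LEMMAS AND PROOFS =====

-- the grouping dict's list at key d is exactly the pairs of m whose distance is d, in order
theorem pvGroupByDist_getD (m : List (Int × Int × Int)) (d : Int) :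
    (pvGroupByDist m).getD d [] =
      (m.filter (fun e => e.2.2 == d)).map (fun e => (e.1, e.2.1)) := by
  have h : pvGroupByDist m =
      (m.map (fun e => (e.2.2, (e.1, e.2.1)))).foldl
        (fun by_d p => by_d.modify p.1 [] (· ++ [p.2])) PySem.Dict.empty := by
    simp [pvGroupByDist, List.foldl_map]
  rw [h, PySem.Dict.getD_foldl_modify_append, PySem.Dict.getD_empty]
  rw [List.filter_map, List.map_map]
  rfl

-- the inner s-loop of A equals B's lookup loop, for any accumulator
theorem pv_inner (ms : List (Int × Int × Int)) (dr : Int) (F : (Int × Int) → ((Int × Int) × (Int × Int) × (Int × Int) × (Int × Int)))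
    (acc : List ((Int × Int) × (Int × Int) × (Int × Int) × (Int × Int))) :
    ms.foldl (fun e2s es => if dr == es.2.2 then e2s ++ [F (es.1, es.2.1)] else e2s) acc =
      ((pvGroupByDist ms).getD dr []).foldl (fun e2s p => e2s ++ [F p]) acc := by
  rw [pvGroupByDist_getD, PySem.List.foldl_append_singleton_eq_map,
      PySem.List.foldl_append_if, List.map_map]
  have : (fun e : Int × Int × Int => e.2.2 == dr) = (fun e : Int × Int × Int => dr == e.2.2) := by
    funext e
    by_cases h : e.2.2 = dr
    · simp [h]
    · simp [h, Ne.symm h]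
  rw [this]
  rfl

-- ===== VERDICT (by name: the statement is the Claim_ definition above) =====
theorem find_equal_2sets_spec : Claim_equal_find_equal_2sets := by
  intro dist_maps _
  unfold Spec_find_equal_2sets find_equal_2sets find_equal_2sets_alt
  rw [PySem.List.enumerate_eq_map_pyRange dist_maps ([] : List (Int × Int × Int)), List.foldl_map]
  refine PySem.List.foldl_congr_mem _ _ _ _ ?_
  intro e2s r _
  refine PySem.List.foldl_congr_mem _ _ _ _ ?_
  intro e2s s _
  refine PySem.List.foldl_congr_mem _ _ _ _ ?_
  intro e2s er _
  rw [show (PySem.Dict.empty : PySem.Dict Int (List (Int × Int))) = pvGroupByDist [] from rfl,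
      PySem.List.pyGetD_map pvGroupByDist dist_maps s []]
  exact pv_inner (PySem.List.pyGetD dist_maps s []) er.2.2 (fun p => ((r, er.1), (r, er.2.1), (s, p.1), (s, p.2))) e2s
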